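-- pv_equiv track=rewrite | github.com/BenSlashr/cristallina | scripts/maillage-auto.py | generate_anchor
-- ===== SOURCE A (Python) =====
-- def generate_anchor(source, target):
--     """Generate a natural anchor text for the link."""
--     title = target['title']
--
--     # Try to extract a short, natural anchor from the title
--     # Remove ":" and what follows if title is long
--     if ':' in title and len(title) > 50:
--         title = title.split(':')[0].strip()
--
--     # Clean up common prefixes
--     for prefix in ['Comment ', 'Pourquoi ', "L'", 'Le ', 'La ', 'Les ']:
--         if title.startswith(prefix) and len(title) > 40:
--             pass  # Keep it for now
--
--     # Shorten very long titles
--     if len(title) > 60: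
--         # Try to find a natural break
--         words = title.split()
--         short = []
--         for w in words:
--             short.append(w)
--             if len(' '.join(short)) > 40:
--                 break
--         title = ' '.join(short)
--
--     return title.lower().rstrip('.')
-- ===== SOURCE B (Python) =====
-- def generate_anchor(source, target):
--     """Generate a natural anchor text for the link."""
--     title = target['title']
--
--     if ':' in title and len(title) > 50:
--         title = title.split(':')[0].strip()
--
--     # (A's prefix loop is a no-op: dropped.)
--
--     if len(title) > 60:
--         # Work on the whitespace-normalised string itself instead of looping
--         # over words: in s = ' '.join(title.split()) every space marks a word
--         # boundary, so the first space at index >= 41 is exactly where A's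
--         # word loop stops (joined length first exceeds 40); cut there.
--         s = ' '.join(title.split())
--         j = s.find(' ', 41)
--         title = s if j == -1 else s[:j]
--
--     return title.lower().rstrip('.')
-- ===== Notes on version B (the rewrite author's own statement) =====
-- stated objective: alternative
-- what changed: Drops A's no-op prefix loop and replaces the word-accumulation loop (re-joining the prefix each iteration and breaking past 40 chars) by a string-level computation: normalise whitespace with one join, then cut at the first space at index >= 41, found with a single str.find.
import Mathlib
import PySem

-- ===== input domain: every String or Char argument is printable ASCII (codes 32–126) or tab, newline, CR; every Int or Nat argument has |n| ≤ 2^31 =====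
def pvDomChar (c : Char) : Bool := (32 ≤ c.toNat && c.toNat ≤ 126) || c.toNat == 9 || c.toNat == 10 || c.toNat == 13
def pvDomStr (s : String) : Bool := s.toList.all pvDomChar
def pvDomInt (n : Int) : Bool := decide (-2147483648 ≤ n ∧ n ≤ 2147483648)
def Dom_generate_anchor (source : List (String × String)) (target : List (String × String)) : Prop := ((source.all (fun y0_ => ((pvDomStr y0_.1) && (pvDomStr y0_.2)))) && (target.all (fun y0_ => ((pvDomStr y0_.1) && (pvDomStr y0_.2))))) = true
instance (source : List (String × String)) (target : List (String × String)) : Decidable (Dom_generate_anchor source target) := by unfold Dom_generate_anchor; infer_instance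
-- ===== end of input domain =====

-- B drops A's no-op prefix loop and replaces A's word-accumulation loop by a string-level
-- computation: normalise once with one join, then cut at the first space at index >= 41.
-- Both Pythons raise KeyError when target has no 'title' key; Pre_ excludes exactly that.

-- shared exact helper: Python's title.rstrip('.') — drop trailing '.' characters (hand port, exact)
def pvRstripDot (s : String) : String :=
  String.ofList ((s.toList.reverse.dropWhile (fun c => c == '.')).reverse)

-- ===== PORT A =====
-- the 'for w in words: short.append(w); if len(' '.join(short)) > 40: break' loop
def pvShortLoopA (words : List String) (short : List String) : List String :=
  match words with
  | [] => short
  | w :: rest =>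
    let short' := short ++ [w]
    if PySem.Str.len (PySem.Str.join " " short') > 40 then short'
    else pvShortLoopA rest short'

def generate_anchor (source : List (String × String)) (target : List (String × String)) : String :=
  let title := ((PySem.Dict.mk target).get? "title").getD ""   -- target['title']; Pre_ guarantees presence
  let title :=
    if PySem.Str.isIn ":" title && decide (PySem.Str.len title > 50) then
      PySem.Str.strip (((PySem.Str.split? title ":").getD []).headD "")   -- title.split(':')[0].strip()
    else title
  -- prefix loop: body is 'pass', state unchanged
  let title := ["Comment ", "Pourquoi ", "L'", "Le ", "La ", "Les "].foldl
    (fun t p => if PySem.Str.startswith t p && decide (PySem.Str.len t > 40) then t else t) title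
  let title :=
    if PySem.Str.len title > 60 then
      PySem.Str.join " " (pvShortLoopA (PySem.Str.split₀ title) [])
    else title
  pvRstripDot (PySem.Str.lower title)

-- ===== PORT B =====
def generate_anchor_alt (source : List (String × String)) (target : List (String × String)) : String :=
  let title := ((PySem.Dict.mk target).get? "title").getD ""
  let title :=
    if PySem.Str.isIn ":" title && decide (PySem.Str.len title > 50) then
      PySem.Str.strip (((PySem.Str.split? title ":").getD []).headD "")
    else title
  let title :=
    if PySem.Str.len title > 60 then
      let s := PySem.Str.join " " (PySem.Str.split₀ title)        -- ' '.join(title.split())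
      let j := PySem.Str.findFrom s " " 41                        -- s.find(' ', 41)
      if j = -1 then s else PySem.Str.slice s none (some j)       -- s if j == -1 else s[:j]
    else title
  pvRstripDot (PySem.Str.lower title)

-- ===== PRECONDITION & SPEC =====
-- Pre_ excludes exactly the targets without a 'title' key, on which A raises KeyError.
def Pre_generate_anchor (source : List (String × String)) (target : List (String × String)) : Prop :=
  (PySem.Dict.mk target).contains "title" = true
instance (source : List (String × String)) (target : List (String × String)) : Decidable (Pre_generate_anchor source target) := by unfold Pre_generate_anchor; infer_instance

def pvWitness_generate_anchor : (List (String × String)) × (List (String × String)) :=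
  ([], [("title", "A short title")])

def Spec_generate_anchor (source : List (String × String)) (target : List (String × String)) (out : String) : Prop := out = generate_anchor_alt source target
instance (source : List (String × String)) (target : List (String × String)) (out : String) : Decidable (Spec_generate_anchor source target out) := by unfold Spec_generate_anchor; infer_instance

-- ===== CLAIM (what is proved, stated in full; the proofs are below) =====
def Claim_equal_generate_anchor : Prop := ∀ (source : List (String × String)) (target : List (String × String)), Dom_generate_anchor source target → Pre_generate_anchor source target → Spec_generate_anchor source target (generate_anchor source target)

-- ===== LEMMAS AND PROOFS =====

-- A's cut index: total starts at -1, add 1+len(w) per word, stop (inclusively) at total > 40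
def pvFindK (words : List String) (i : Nat) (total : Int) : Nat :=
  match words with
  | [] => i
  | w :: rest =>
    let total' := total + 1 + PySem.Str.len w
    if total' > 40 then i + 1 else pvFindK rest (i + 1) total'

-- the same cut index on char lists, carrying the remaining budget d = 41 - (joined length so far)
def pvK (ws : List (List Char)) (d : Nat) : Nat :=
  match ws with
  | [] => 0
  | w :: rest => if d ≤ w.length then 1 else 1 + pvK rest (d - w.length - 1)

-- cut s at the first space at index ≥ d (whole s if none)
def pvCut (s : List Char) (d : Nat) : List Char :=
  match (s.drop d).findIdx? (· == ' ') with
  | none => s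
  | some j => s.take (d + j)

-- length of ' '.join(short ++ [w]) in terms of the previous joined length
lemma join_len_append (short : List String) (w : String) :
    PySem.Str.len (PySem.Str.join " " (short ++ [w])) =
      (if short = [] then -1 else PySem.Str.len (PySem.Str.join " " short)) + 1 + PySem.Str.len w := by
  have key : ∀ (xs : List (List Char)) (y : List Char),
      ((PySem.Chars.join [' '] (xs ++ [y])).length : Int) =
        (if xs = [] then -1 else ((PySem.Chars.join [' '] xs).length : Int)) + 1 + y.length := by
    intro xs
    induction xs with
    | nil => intro y; simp [PySem.Chars.join_singleton]
    | cons x rest ih =>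
      intro y
      cases rest with
      | nil =>
        simp [PySem.Chars.join_cons_cons, PySem.Chars.join_singleton]
        ring
      | cons r rs =>
        have h1 : (x :: r :: rs) ++ [y] = x :: r :: (rs ++ [y]) := by simp
        rw [h1, PySem.Chars.join_cons_cons [' '] x r (rs ++ [y]),
            PySem.Chars.join_cons_cons [' '] x r rs]
        have h2 : r :: (rs ++ [y]) = (r :: rs) ++ [y] := by simp
        rw [h2]
        have ih' := ih y
        simp only [if_neg (List.cons_ne_nil r rs)] at ih'
        simp only [List.length_append, if_neg (List.cons_ne_nil x (r :: rs))]
        push_cast at ih' ⊢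
        omega
  simp only [PySem.Str.len_eq, PySem.Str.toList_join, List.map_append, List.map_cons, List.map_nil]
  have hsep : (" " : String).toList = [' '] := by decide
  rw [hsep, key]
  by_cases h : short = [] <;> simp [h]

lemma pvFindK_succ (words : List String) (i : Nat) (t : Int) :
    pvFindK words (i + 1) t = pvFindK words i t + 1 := by
  induction words generalizing i t with
  | nil => simp [pvFindK]
  | cons w rest ih =>
    simp only [pvFindK]
    split_ifs <;> [rfl; exact ih _ _]

-- loop invariant: A's accumulating loop is short ++ take (cut index) of the remaining words
lemma shortLoop_eq (words : List String) (short : List String) :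
    pvShortLoopA words short =
      short ++ words.take (pvFindK words 0 (if short = [] then -1 else PySem.Str.len (PySem.Str.join " " short))) := by
  induction words generalizing short with
  | nil => simp [pvShortLoopA, pvFindK]
  | cons w rest ih =>
    simp only [pvShortLoopA, pvFindK]
    rw [join_len_append short w]
    set t := (if short = [] then -1 else PySem.Str.len (PySem.Str.join " " short)) + 1 + PySem.Str.len w with ht
    by_cases h : t > 40
    · simp [h]
    · simp only [if_neg h, ih (short ++ [w])]
      have hne : short ++ [w] ≠ [] := by simp
      rw [if_neg hne, join_len_append short w, ← ht, pvFindK_succ]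
      simp [List.take_succ_cons]

-- pvFindK is pvK with the budget d = (40 - total).toNat
lemma pvFindK_eq_pvK (words : List String) (i : Nat) (total : Int) (h : total ≤ 40) :
    pvFindK words i total = i + pvK (words.map String.toList) (40 - total).toNat := by
  induction words generalizing i total with
  | nil => simp [pvFindK, pvK]
  | cons w rest ih =>
    simp only [pvFindK, pvK, List.map_cons, PySem.Str.len_eq]
    have hlen : (0:Int) ≤ (w.toList.length : Int) := by positivity
    by_cases hc : total + 1 + (w.toList.length : Int) > 40
    · rw [if_pos hc, if_pos (by omega : (40 - total).toNat ≤ w.toList.length)]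
    · rw [if_neg hc, if_neg (by omega : ¬ (40 - total).toNat ≤ w.toList.length),
          ih _ _ (by omega)]
      have : (40 - (total + 1 + (w.toList.length:Int))).toNat
           = (40 - total).toNat - w.toList.length - 1 := by omega
      rw [this]; omega

lemma split₀_go_spec (s : List Char) : ∀ (cur : List Char) (acc : List (List Char)),
    (∀ w ∈ acc, w ≠ [] ∧ ∀ c ∈ w, PySem.Chars.isspace c = false) →
    (∀ c ∈ cur, PySem.Chars.isspace c = false) →
    ∀ w ∈ PySem.Chars.split₀.go s cur acc, w ≠ [] ∧ ∀ c ∈ w, PySem.Chars.isspace c = false := by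
  induction s with
  | nil =>
    intro cur acc hacc hcur w hw
    simp only [PySem.Chars.split₀.go] at hw
    split at hw
    · exact hacc w (by simpa using hw)
    · rename_i hne
      rcases (by simpa using hw : w ∈ acc ∨ w = cur.reverse) with h | rfl
      · exact hacc w h
      · exact ⟨by simpa [List.isEmpty_iff] using hne, fun c hc => hcur c (by simpa using hc)⟩
  | cons c rest ih =>
    intro cur acc hacc hcur w hw
    simp only [PySem.Chars.split₀.go] at hw
    split at hw
    · split at hw
      · exact ih [] acc hacc (by simp) w hw
      · rename_i hsp hne
        refine ih [] (cur.reverse :: acc) ?_ (by simp) w hw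
        intro v hv
        rcases List.mem_cons.mp hv with rfl | hv'
        · exact ⟨by simpa [List.isEmpty_iff] using hne, fun d hd => hcur d (by simpa using hd)⟩
        · exact hacc v hv'
    · rename_i hsp
      refine ih (c :: cur) acc hacc ?_ w hw
      intro d hd
      rcases List.mem_cons.mp hd with rfl | hd'
      · simpa using hsp
      · exact hcur d hd'

-- every word of split₀ is nonempty and whitespace-free
lemma split₀_spec (l : List Char) :
    ∀ w ∈ PySem.Chars.split₀ l, w ≠ [] ∧ ∀ c ∈ w, PySem.Chars.isspace c = false := by
  exact split₀_go_spec l [] [] (by simp) (by simp)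

-- [a] <+: m iff m starts with a
lemma singleton_prefix_iff (a : Char) (m : List Char) : [a] <+: m ↔ m.head? = some a := by
  cases m with
  | nil => simp
  | cons x xs => simp [List.cons_prefix_cons, eq_comm]

-- Chars.find for a single-char needle is findIdx?
lemma find_space_eq (l : List Char) :
    PySem.Chars.find l [' '] = match l.findIdx? (· == ' ') with | none => -1 | some j => (j : Int) := by
  have hdrop : ∀ i : Nat, ([' '] <+: l.drop i) ↔ l[i]? = some ' ' := by
    intro i; rw [singleton_prefix_iff, List.head?_drop]
  cases hf : l.findIdx? (· == ' ') with
  | none =>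
    have hall := List.findIdx?_eq_none_iff.mp hf
    refine (PySem.Chars.find_eq_neg_one_iff l [' ']).mpr ?_
    rw [List.singleton_infix_iff]
    intro hm
    simpa using hall ' ' hm
  | some j =>
    obtain ⟨hj, hpj, hmin⟩ := List.findIdx?_eq_some_iff_getElem.mp hf
    have hmem : ' ' ∈ l := by
      have : l[j] = ' ' := by simpa using hpj
      exact this ▸ List.getElem_mem hj
    have hpos : 0 ≤ PySem.Chars.find l [' '] :=
      (PySem.Chars.find_nonneg_iff l [' ']).mpr (List.singleton_infix_iff ' ' l |>.mpr hmem)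
    obtain ⟨hpre, hless⟩ := PySem.Chars.find_spec hpos
    have h1 : l[(PySem.Chars.find l [' ']).toNat]? = some ' ' := (hdrop _).mp hpre
    have hjlt : l[j]? = some ' ' := by
      rw [List.getElem?_eq_getElem hj]; simpa using hpj
    have hge : j ≤ (PySem.Chars.find l [' ']).toNat := by
      by_contra hlt
      push Not at hlt
      have := hmin _ hlt
      have hval : l[(PySem.Chars.find l [' ']).toNat] = ' ' := by
        have hlen : (PySem.Chars.find l [' ']).toNat < l.length := (List.getElem?_eq_some_iff.mp h1).1
        simpa [List.getElem?_eq_getElem hlen] using h1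
      simp [hval] at this
    have hle : (PySem.Chars.find l [' ']).toNat ≤ j := by
      by_contra hlt
      push Not at hlt
      exact hless j hlt ((hdrop j).mpr hjlt)
    have : (PySem.Chars.find l [' ']).toNat = j := le_antisymm hle hge
    simp only []
    omega

-- B's find-and-slice computes pvCut at d = 41
lemma findFrom41_cut (s : List Char) :
    (if PySem.Chars.findFrom s [' '] 41 = -1 then s
     else PySem.List.slice s none (some (PySem.Chars.findFrom s [' '] 41))) = pvCut s 41 := by
  have hff : PySem.Chars.findFrom s [' '] 41 =
      if (s.length : Int) < 41 then -1
      else if PySem.Chars.find (s.drop 41) [' '] = -1 then -1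
      else 41 + PySem.Chars.find (s.drop 41) [' '] := by
    show (if (s.length:Int) < (41:Int) then (-1:Int)
          else if PySem.Chars.find ((s.take (s.length:Int).toNat).drop (41:Int).toNat) [' '] = -1 then -1
          else 41 + PySem.Chars.find ((s.take (s.length:Int).toNat).drop (41:Int).toNat) [' ']) = _
    simp [List.take_length]
  by_cases hlen : (s.length : Int) < 41
  · have hd : s.drop 41 = [] := List.drop_eq_nil_of_le (by omega)
    rw [hff]
    simp [pvCut, hlen, hd]
  · rw [hff, if_neg hlen, find_space_eq]
    cases hfi : (s.drop 41).findIdx? (· == ' ') with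
    | none => simp [pvCut, hfi]
    | some j =>
      have h41 : ¬ (41 + (j:Int) = -1) := by omega
      simp only [pvCut, hfi]
      rw [if_neg (by omega : ¬ ((j:Int) = -1)), if_neg h41,
          PySem.List.slice_to s (by omega : (0:Int) ≤ 41 + (j:Int))]
      have hnat : ((41:Int) + (j:Int)).toNat = 41 + j := by omega
      rw [hnat]

-- the heart: joining the first pvK words = cutting the full join at the first space at index ≥ d
lemma cut_lemma (ws : List (List Char)) (d : Nat)
    (h : ∀ w ∈ ws, w ≠ [] ∧ ∀ c ∈ w, (c == ' ') = false) :
    PySem.Chars.join [' '] (ws.take (pvK ws d)) = pvCut (PySem.Chars.join [' '] ws) d := by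
  induction ws generalizing d with
  | nil => simp [pvK, pvCut, PySem.Chars.join_nil]
  | cons w rest ih =>
    obtain ⟨hwne, hwsp⟩ := h w List.mem_cons_self
    have hnospW : ∀ (m : List Char), (∀ c ∈ m, (c == ' ') = false) →
        List.findIdx? (· == ' ') m = none := fun m hm => List.findIdx?_eq_none_iff.mpr hm
    cases rest with
    | nil =>
      have hk : pvK [w] d = 1 := by simp [pvK]
      rw [hk]
      have hno : List.findIdx? (· == ' ') (w.drop d) = none :=
        hnospW _ (fun c hc => hwsp c (List.mem_of_mem_drop hc))
      simp [pvCut, PySem.Chars.join_singleton, hno]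
    | cons r rs =>
      have hjoin : PySem.Chars.join [' '] (w :: r :: rs) =
          w ++ ' ' :: PySem.Chars.join [' '] (r :: rs) := by
        rw [PySem.Chars.join_cons_cons]; simp
      set jr := PySem.Chars.join [' '] (r :: rs) with hjr
      by_cases hd : d ≤ w.length
      · have hk : pvK (w :: r :: rs) d = 1 := by simp [pvK, hd]
        rw [hk]
        have hnoW : List.findIdx? (· == ' ') (w.drop d) = none :=
          hnospW _ (fun c hc => hwsp c (List.mem_of_mem_drop hc))
        have hdrop : (w ++ ' ' :: jr).drop d = w.drop d ++ ' ' :: jr := by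
          rw [List.drop_append]
          have : d - w.length = 0 := by omega
          rw [this]; simp
        have hfi : List.findIdx? (· == ' ') ((w ++ ' ' :: jr).drop d) =
            some (w.length - d) := by
          rw [hdrop, List.findIdx?_append, hnoW]
          simp [List.findIdx?_cons, List.length_drop]
        have ht1 : (w :: r :: rs).take 1 = [w] := rfl
        simp only [pvCut, hjoin, hfi, ht1, PySem.Chars.join_singleton]
        have hdlen : d + (w.length - d) = w.length := by omega
        rw [hdlen, List.take_append]
        simp
      · push Not at hd
        have hk : pvK (w :: r :: rs) d = 1 + pvK (r :: rs) (d - w.length - 1) := by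
          have hnd : ¬ d ≤ w.length := by omega
          simp [pvK, hnd]
        have hd' : d - w.length - 1 = d - w.length - 1 := rfl
        have hk1 : 1 ≤ pvK (r :: rs) (d - w.length - 1) := by
          simp [pvK]; split <;> omega
        have htake : (w :: r :: rs).take (pvK (w :: r :: rs) d) =
            w :: (r :: rs).take (pvK (r :: rs) (d - w.length - 1)) := by
          rw [hk, Nat.add_comm 1, List.take_succ_cons]
        rw [htake]
        have hktail : (r :: rs).take (pvK (r :: rs) (d - w.length - 1)) =
            r :: rs.take (pvK (r :: rs) (d - w.length - 1) - 1) := by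
          obtain ⟨k', hk'⟩ : ∃ k', pvK (r :: rs) (d - w.length - 1) = k' + 1 :=
            ⟨pvK (r :: rs) (d - w.length - 1) - 1, by omega⟩
          rw [hk', List.take_succ_cons]; simp
        have hjoinL : PySem.Chars.join [' '] (w :: (r :: rs).take (pvK (r :: rs) (d - w.length - 1))) =
            w ++ ' ' :: PySem.Chars.join [' '] ((r :: rs).take (pvK (r :: rs) (d - w.length - 1))) := by
          rw [hktail, PySem.Chars.join_cons_cons]; simp
        have hih := ih (d - w.length - 1) (fun v hv => h v (List.mem_cons_of_mem w hv))
        rw [hjoinL, hih]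
        have hdropR : (w ++ ' ' :: jr).drop d = jr.drop (d - w.length - 1) := by
          rw [List.drop_append, List.drop_eq_nil_of_le (by omega : w.length ≤ d)]
          have h1 : d - w.length = (d - w.length - 1) + 1 := by omega
          have h2 : d - w.length - 1 + 1 - 1 = d - w.length - 1 := by omega
          rw [h1, List.drop_succ_cons, List.nil_append, h2]
        rw [hjoin]
        unfold pvCut
        rw [hdropR]
        cases hfi : List.findIdx? (· == ' ') (jr.drop (d - w.length - 1)) with
        | none => rfl
        | some j =>
          simp only []
          rw [List.take_append, List.take_of_length_le (by omega : w.length ≤ d + j)]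
          have h2 : d + j - w.length = ((d - w.length - 1) + j) + 1 := by omega
          rw [h2, List.take_succ_cons]

-- per-title equality of the two >60 branches
lemma core_eq (title : String) :
    PySem.Str.join " " (pvShortLoopA (PySem.Str.split₀ title) []) =
      (let s := PySem.Str.join " " (PySem.Str.split₀ title)
       let j := PySem.Str.findFrom s " " 41
       if j = -1 then s else PySem.Str.slice s none (some j)) := by
  have hsep : (" " : String).toList = [' '] := by decide
  have hspec : ∀ w ∈ (PySem.Str.split₀ title).map String.toList,
      w ≠ [] ∧ ∀ c ∈ w, (c == ' ') = false := by
    rw [PySem.Str.split₀_map_toList]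
    intro w hw
    obtain ⟨h1, h2⟩ := split₀_spec title.toList w hw
    refine ⟨h1, fun c hc => ?_⟩
    cases hbe : (c == ' ') with
    | false => rfl
    | true =>
      exact absurd (h2 c hc) (by rw [(by simpa using hbe : c = ' ')]; decide)
  apply String.toList_inj.mp
  simp only []
  rw [shortLoop_eq, PySem.Str.toList_join, hsep]
  simp only [List.nil_append, if_true]
  rw [pvFindK_eq_pvK _ 0 (-1) (by omega)]
  have hn : ((40 : Int) - (-1)).toNat = 41 := by decide
  rw [hn, List.map_take, Nat.zero_add, cut_lemma _ 41 hspec]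
  rw [apply_ite String.toList, PySem.Str.toList_slice, PySem.Str.toList_join, hsep,
      PySem.Str.findFrom_eq, hsep, PySem.Str.toList_join, hsep]
  simp only [PySem.Chars.slice_eq_listSlice]
  exact (findFrom41_cut _).symm

-- ===== VERDICT (by name: the statement is the Claim_ definition above) =====
theorem generate_anchor_spec : Claim_equal_generate_anchor := by
  intro source target _ _
  unfold Spec_generate_anchor generate_anchor generate_anchor_alt
  simp only [core_eq, List.foldl_cons, List.foldl_nil, ite_self]
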